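-- pv_equiv track=rewrite | github.com/sraaphorst/advent-of-code-2018 | day_05.py | simplify_polymer
-- ===== SOURCE A (Python) =====
-- def flip(c):
--     """
--     Flip a character's polarity, i.e. a maps to A, B maps to b, etc.
--     :param c: the single character
--     :return: the reversed character wrt case
--
--     >>> flip('a')
--     'A'
--     >>> flip('B')
--     'b'
--     """
--     return c.upper() if c.islower() else c.lower()
--
-- def simplify_polymer(polymer, ignore = ''):
--     """
--     Take a string representing a polymer, and keep negating adjacent elements of different polarity until the
--     string is in its simplest form.
--     :param polymer: the string representing the polymer
--     :param ignore: try ignoring this polymer and its companion of inverse polarity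
--     :return: the simplified polymer
--
--     >>> simplify_polymer('a')
--     'a'
--     >>> simplify_polymer('aA')
--     ''
--     >>> simplify_polymer('abBA')
--     ''
--     >>> simplify_polymer('abAB')
--     'abAB'
--     >>> simplify_polymer('aabAAB')
--     'aabAAB'
--     >>> simplify_polymer('dabAcCaCBAcCcaDA')
--     'dabCBAcaDA'
--     """
--     # This is easily done with a stack, which will represent the simplified polymer.
--     stack = []
--     for p in polymer:
--         if p.lower() == ignore or p.upper() == ignore:
--             continue
--         if len(stack) > 0 and stack[-1] == flip(p):
--             stack.pop()
--         else:
--             stack.append(p)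
--
--     return ''.join(stack)
-- ===== SOURCE B (Python) =====
-- def flip(c):
--     return c.upper() if c.islower() else c.lower()
--
-- def simplify_polymer(polymer, ignore=''):
--     # fixed-point reduction: filter first, then repeatedly delete the first
--     # adjacent cancelling pair until a full scan finds none
--     s = [c for c in polymer if c.lower() != ignore and c.upper() != ignore]
--     while True:
--         for i in range(len(s) - 1):
--             if s[i] == flip(s[i + 1]):
--                 del s[i:i + 2]
--                 break
--         else:
--             return ''.join(s)
-- ===== Notes on version B (the rewrite author's own statement) =====
-- stated objective: alternative
-- what changed: Replaced the single-pass stack reduction (which interleaves the ignore-filter and cancellation) by a filter-first, fixed-point algorithm that repeatedly scans for and deletes the first adjacent cancelling pair until none remains.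
import Mathlib
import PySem

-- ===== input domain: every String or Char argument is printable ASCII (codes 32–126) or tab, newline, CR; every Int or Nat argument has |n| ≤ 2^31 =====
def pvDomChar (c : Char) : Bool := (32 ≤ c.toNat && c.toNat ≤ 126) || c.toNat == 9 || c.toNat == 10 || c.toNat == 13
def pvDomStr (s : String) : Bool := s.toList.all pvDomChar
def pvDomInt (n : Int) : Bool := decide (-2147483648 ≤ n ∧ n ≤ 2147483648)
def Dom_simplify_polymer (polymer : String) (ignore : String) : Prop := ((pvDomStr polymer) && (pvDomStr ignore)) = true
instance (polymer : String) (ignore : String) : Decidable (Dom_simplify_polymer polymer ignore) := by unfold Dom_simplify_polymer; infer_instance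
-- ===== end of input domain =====

-- B replaces A's single-pass stack reduction by a filter-first, fixed-point repeated
-- removal of the first adjacent cancelling pair (alternative algorithm, not faster).

-- ===== PORT A =====
-- shared helper: Python's module-level flip(c), used by both implementations
def pvFlip (c : Char) : Char :=
  if PySem.Chars.islower c then PySem.Chars.upperChar c else PySem.Chars.lowerChar c

def simplify_polymer (polymer : String) (ignore : String) : String :=
  String.ofList (polymer.toList.foldl (fun stack p =>
    if [PySem.Chars.lowerChar p] = ignore.toList ∨ [PySem.Chars.upperChar p] = ignore.toList then
      stack
    else if 0 < stack.length ∧ stack.getLast? = some (pvFlip p) then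
      stack.dropLast
    else
      stack ++ [p]) [])

-- ===== PORT B =====
-- one left-to-right scan of B's inner for-loop: remove the first adjacent cancelling pair
def pvRmFirst : List Char → Option (List Char)
  | a :: b :: t => if a = pvFlip b then some t else (pvRmFirst (b :: t)).map (a :: ·)
  | _ => none

lemma pvRmFirst_length : ∀ {l l' : List Char}, pvRmFirst l = some l' → l'.length < l.length
  | a :: b :: t, l', h => by
    by_cases hp : a = pvFlip b
    · simp only [pvRmFirst, if_pos hp, Option.some.injEq] at h
      subst h; simp
    · simp only [pvRmFirst, if_neg hp, Option.map_eq_some_iff] at h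
      obtain ⟨l'', h1, rfl⟩ := h
      have := pvRmFirst_length h1
      simpa using Nat.succ_lt_succ this

-- B's outer while-loop: iterate until no cancelling pair remains
def pvLoop (s : List Char) : List Char :=
  match h : pvRmFirst s with
  | some s' => pvLoop s'
  | none => s
termination_by s.length
decreasing_by exact pvRmFirst_length h

def simplify_polymer_alt (polymer : String) (ignore : String) : String :=
  String.ofList (pvLoop (polymer.toList.filter (fun c =>
    !(decide ([PySem.Chars.lowerChar c] = ignore.toList)
      || decide ([PySem.Chars.upperChar c] = ignore.toList)))))

-- ===== PRECONDITION & SPEC =====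
def Spec_simplify_polymer (polymer : String) (ignore : String) (out : String) : Prop := out = simplify_polymer_alt polymer ignore
instance (polymer : String) (ignore : String) (out : String) : Decidable (Spec_simplify_polymer polymer ignore out) := by unfold Spec_simplify_polymer; infer_instance

-- ===== CLAIM (what is proved, stated in full; the proofs are below) =====
def Claim_equal_simplify_polymer : Prop := ∀ (polymer : String) (ignore : String), Dom_simplify_polymer polymer ignore → Spec_simplify_polymer polymer ignore (simplify_polymer polymer ignore)

-- ===== LEMMAS AND PROOFS =====

-- A's stack step with the ignore-skip removed (acts on filtered input)
def pvStepN (st : List Char) (p : Char) : List Char :=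
  if 0 < st.length ∧ st.getLast? = some (pvFlip p) then st.dropLast else st ++ [p]

-- the same step on the reversed stack (top of stack = head)
def pvStepR (rs : List Char) (p : Char) : List Char :=
  if rs.head? = some (pvFlip p) then rs.tail else p :: rs

lemma pv_char_le_iff (a b : Char) : a ≤ b ↔ a.toNat ≤ b.toNat := by
  rw [Char.le_def, UInt32.le_iff_toNat_le]; rfl

lemma pv_toNat_inj {a b : Char} (h : a.toNat = b.toNat) : a = b := by
  have := congrArg Char.ofNat h
  simpa [Char.ofNat_toNat] using this

lemma pv_toNat_ofNat_valid {n : Nat} (h : n < 0xD800) : (Char.ofNat n).toNat = n := by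
  rw [Char.toNat_ofNat, if_pos (Or.inl h)]

lemma pv_islower_iff (c : Char) : PySem.Chars.islower c = true ↔ 97 ≤ c.toNat ∧ c.toNat ≤ 122 := by
  simp [PySem.Chars.islower, pv_char_le_iff]

lemma pv_isupper_iff (c : Char) : PySem.Chars.isupper c = true ↔ 65 ≤ c.toNat ∧ c.toNat ≤ 90 := by
  simp [PySem.Chars.isupper, pv_char_le_iff]

lemma pv_toNat_pvFlip (c : Char) : (pvFlip c).toNat =
    if 97 ≤ c.toNat ∧ c.toNat ≤ 122 then c.toNat - 32
    else if 65 ≤ c.toNat ∧ c.toNat ≤ 90 then c.toNat + 32 else c.toNat := by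
  unfold pvFlip PySem.Chars.upperChar PySem.Chars.lowerChar
  by_cases h1 : 97 ≤ c.toNat ∧ c.toNat ≤ 122
  · rw [if_pos ((pv_islower_iff c).2 h1), if_pos ((pv_islower_iff c).2 h1), if_pos h1]
    exact pv_toNat_ofNat_valid (by omega)
  · rw [if_neg (fun h => h1 ((pv_islower_iff c).1 h)), if_neg h1]
    by_cases h2 : 65 ≤ c.toNat ∧ c.toNat ≤ 90
    · rw [if_pos ((pv_isupper_iff c).2 h2), if_pos h2]
      exact pv_toNat_ofNat_valid (by omega)
    · rw [if_neg (fun h => h2 ((pv_isupper_iff c).1 h)), if_neg h2]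

lemma pvFlip_pvFlip (c : Char) : pvFlip (pvFlip c) = c := by
  apply pv_toNat_inj
  rw [pv_toNat_pvFlip, pv_toNat_pvFlip]
  split_ifs <;> omega

-- A's interleaved skip = filter first, then the plain stack step
lemma pv_filter_fold (ig : List Char) :
    ∀ (l : List Char) (st : List Char),
      l.foldl (fun stack p =>
        if [PySem.Chars.lowerChar p] = ig ∨ [PySem.Chars.upperChar p] = ig then stack
        else if 0 < stack.length ∧ stack.getLast? = some (pvFlip p) then stack.dropLast
        else stack ++ [p]) st
      = (l.filter (fun c =>
          !(decide ([PySem.Chars.lowerChar c] = ig)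
            || decide ([PySem.Chars.upperChar c] = ig)))).foldl pvStepN st := by
  intro l
  induction l with
  | nil => intro st; rfl
  | cons a l ih =>
    intro st
    simp only [List.foldl_cons, List.filter_cons]
    by_cases h : [PySem.Chars.lowerChar a] = ig ∨ [PySem.Chars.upperChar a] = ig
    · have hpred : (!(decide ([PySem.Chars.lowerChar a] = ig)
          || decide ([PySem.Chars.upperChar a] = ig))) = false := by
        rcases h with h | h <;> simp [h]
      rw [if_pos h, hpred]
      simp only [Bool.false_eq_true, if_false]
      exact ih st
    · have hpred : (!(decide ([PySem.Chars.lowerChar a] = ig)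
          || decide ([PySem.Chars.upperChar a] = ig))) = true := by
        simp only [not_or] at h
        simp [h.1, h.2]
      rw [if_neg h, hpred]
      simp only [if_true, List.foldl_cons]
      exact ih (pvStepN st a)

-- one step through the reversed-stack mirror
lemma pv_step_rev (st : List Char) (p : Char) : pvStepN st p = (pvStepR st.reverse p).reverse := by
  rcases List.eq_nil_or_concat st with rfl | ⟨t, x, rfl⟩
  · simp [pvStepN, pvStepR]
  · by_cases h : x = pvFlip p
    · rw [pvStepN, if_pos (by simp [h]), pvStepR]
      simp [h]
    · rw [pvStepN, if_neg (by simp [h]), pvStepR]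
      rw [if_neg (by simp [h])]
      simp

lemma pv_fold_rev : ∀ (l : List Char) (st : List Char),
    l.foldl pvStepN st = (l.foldl pvStepR st.reverse).reverse := by
  intro l
  induction l with
  | nil => intro st; simp
  | cons a l ih =>
    intro st
    simp only [List.foldl_cons]
    rw [pv_step_rev, ih, List.reverse_reverse]

-- the reversed stack never contains an adjacent cancelling pair
lemma pv_step_red {rs : List Char} (h : List.IsChain (fun a b => b ≠ pvFlip a) rs) (p : Char) :
    List.IsChain (fun a b => b ≠ pvFlip a) (pvStepR rs p) := by
  unfold pvStepR
  by_cases hc : rs.head? = some (pvFlip p)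
  · rw [if_pos hc]; exact h.tail
  · rw [if_neg hc]
    rw [List.isChain_cons]
    refine ⟨?_, h⟩
    intro y hy hcontra
    exact hc (by rw [hy, hcontra])

-- removing a cancelling pair does not change a reduced stack
lemma pv_pair_cancel {rs : List Char} (h : List.IsChain (fun a b => b ≠ pvFlip a) rs)
    {a b : Char} (hab : a = pvFlip b) : pvStepR (pvStepR rs a) b = rs := by
  have hba : b = pvFlip a := by rw [hab, pvFlip_pvFlip]
  by_cases hc : rs.head? = some (pvFlip a)
  · have h1 : pvStepR rs a = rs.tail := by unfold pvStepR; rw [if_pos hc]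
    cases rs with
    | nil => simp at hc
    | cons x t =>
      have hx : x = pvFlip a := by simpa using hc
      rw [h1, List.tail_cons]
      cases t with
      | nil => simp [pvStepR, hba, hx]
      | cons y t' =>
        have hy : ¬ y = pvFlip b := by
          intro hy
          have := (List.isChain_cons_cons.mp h).1
          apply this
          rw [hy, hx, pvFlip_pvFlip, hab]
        unfold pvStepR
        rw [if_neg (by simpa using hy)]
        rw [hba, hx]
  · have h1 : pvStepR rs a = a :: rs := by unfold pvStepR; rw [if_neg hc]
    rw [h1]
    unfold pvStepR
    rw [List.head?_cons, if_pos (by rw [hab]), List.tail_cons]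

-- one scan of B's inner loop removes a pair without changing the fold value
lemma pv_rm_fold : ∀ (l : List Char) {l' rs : List Char},
    List.IsChain (fun a b => b ≠ pvFlip a) rs → pvRmFirst l = some l' →
    l.foldl pvStepR rs = l'.foldl pvStepR rs := by
  intro l
  induction l with
  | nil => intro l' rs _ h; simp [pvRmFirst] at h
  | cons a l ih =>
    intro l' rs hred h
    cases l with
    | nil => simp [pvRmFirst] at h
    | cons b t =>
      by_cases hp : a = pvFlip b
      · simp only [pvRmFirst, if_pos hp, Option.some.injEq] at h
        subst h
        simp only [List.foldl_cons]
        rw [pv_pair_cancel hred hp]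
      · simp only [pvRmFirst, if_neg hp, Option.map_eq_some_iff] at h
        obtain ⟨l'', h1, rfl⟩ := h
        simp only [List.foldl_cons]
        exact ih (pv_step_red hred a) h1

-- the scan finds nothing ↔ no adjacent cancelling pair in l
lemma pv_rm_none : ∀ (l : List Char),
    pvRmFirst l = none ↔ List.IsChain (fun a b => a ≠ pvFlip b) l := by
  intro l
  induction l with
  | nil => simp [pvRmFirst]
  | cons a l ih =>
    cases l with
    | nil => simp [pvRmFirst]
    | cons b t =>
      simp only [pvRmFirst, List.isChain_cons_cons]
      by_cases hp : a = pvFlip b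
      · simp [hp]
      · simp only [if_neg hp, Option.map_eq_none_iff, ih]
        tauto

-- folding an already-reduced list over a compatible stack just pushes everything
lemma pv_fold_nopair : ∀ (l : List Char) (rs : List Char),
    List.IsChain (fun a b => a ≠ pvFlip b) l →
    (∀ x y, rs.head? = some x → l.head? = some y → x ≠ pvFlip y) →
    l.foldl pvStepR rs = l.reverse ++ rs := by
  intro l
  induction l with
  | nil => intro rs _ _; simp
  | cons a l ih =>
    intro rs hch hj
    simp only [List.foldl_cons]
    have hpush : pvStepR rs a = a :: rs := by
      unfold pvStepR
      rw [if_neg]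
      intro hc
      cases rs with
      | nil => simp at hc
      | cons x t => exact hj x a (by rfl) (by rfl) (by simpa using hc)
    have hj' : ∀ x y, (a :: rs).head? = some x → l.head? = some y → x ≠ pvFlip y := by
      intro x y hx hy
      have hx' : a = x := by simpa using hx
      subst hx'
      exact (List.isChain_cons.mp hch).1 y hy
    rw [hpush, ih (a :: rs) (List.isChain_cons.mp hch).2 hj']
    simp

-- B's outer loop computes exactly the stack-fold result
lemma pv_loop_eq (s : List Char) : pvLoop s = (s.foldl pvStepR []).reverse := by
  rw [pvLoop.eq_def]
  split
  · next s' heq =>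
    rw [pv_loop_eq s', pv_rm_fold s List.isChain_nil heq]
  · next heq =>
    rw [pv_fold_nopair s [] ((pv_rm_none s).mp heq) (by intro x y hx _; simp at hx)]
    simp
termination_by s.length
decreasing_by exact pvRmFirst_length (by assumption)

-- ===== VERDICT (by name: the statement is the Claim_ definition above) =====
theorem simplify_polymer_spec : Claim_equal_simplify_polymer := by
  intro polymer ignore _
  unfold Spec_simplify_polymer simplify_polymer simplify_polymer_alt
  rw [pv_filter_fold, pv_fold_rev, pv_loop_eq]
  rfl
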